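-- pv_equiv track=rewrite | github.com/horlib/SuperQube_games | src/ptm/aggregation.py | _are_payment_models_compatible
-- ===== SOURCE A (Python) =====
-- def _are_payment_models_compatible(model1: str, model2: str) -> bool:
--     """Check if two payment models are compatible/unifiable.
--
--     Args:
--         model1: First payment model
--         model2: Second payment model
--
--     Returns:
--         True if models are compatible
--     """
--     model1_lower = model1.lower()
--     model2_lower = model2.lower()
--
--     # Compatible groups
--     compatible_groups = [
--         {"subscription", "tiered", "freemium"},  # All recurring models
--         {"one-time", "lifetime"},  # One-time payments
--         {"per-seat", "per-user"},  # Per-user pricing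
--     ]
--
--     for group in compatible_groups:
--         if model1_lower in group and model2_lower in group:
--             return True
--
--     return False
-- ===== SOURCE B (Python) =====
-- # B: materialize the compatibility RELATION as an explicit set of ordered pairs
-- # (built once from the groups by a comprehension); the body is one membership
-- # test of the lowered pair - no per-group scan and no per-model lookup.
-- _GROUPS = (
--     ("subscription", "tiered", "freemium"),  # recurring models
--     ("one-time", "lifetime"),                # one-time payments
--     ("per-seat", "per-user"),                # per-user pricing
-- )
--
-- _COMPATIBLE_PAIRS = frozenset(
--     (a, b) for g in _GROUPS for a in g for b in g
-- )
--
--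
-- def _are_payment_models_compatible(model1: str, model2: str) -> bool:
--     return (model1.lower(), model2.lower()) in _COMPATIBLE_PAIRS
-- ===== Notes on version B (the rewrite author's own statement) =====
-- stated objective: simpler
-- what changed: Instead of scanning the list of compatible-group sets and testing both models' membership per group, B precomputes the full compatibility relation as a set of ordered pairs and the body is a single membership test of the lowered pair.
import Mathlib
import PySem

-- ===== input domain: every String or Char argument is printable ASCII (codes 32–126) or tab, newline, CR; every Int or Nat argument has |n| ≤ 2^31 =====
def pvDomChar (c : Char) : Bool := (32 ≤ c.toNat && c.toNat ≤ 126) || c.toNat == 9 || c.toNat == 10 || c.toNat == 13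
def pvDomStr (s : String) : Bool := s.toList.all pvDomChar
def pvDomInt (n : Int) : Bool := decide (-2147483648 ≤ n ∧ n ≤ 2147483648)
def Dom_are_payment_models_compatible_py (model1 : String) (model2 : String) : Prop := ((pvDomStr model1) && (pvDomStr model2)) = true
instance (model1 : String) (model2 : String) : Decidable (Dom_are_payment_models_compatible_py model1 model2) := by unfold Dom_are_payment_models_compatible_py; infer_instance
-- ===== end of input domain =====

-- B replaces A's scan over group-sets by one membership test of the lowered pair
-- in the precomputed compatibility relation (simpler).

-- ===== PORT A =====
def are_payment_models_compatible_py (model1 : String) (model2 : String) : Bool :=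
  let model1_lower := PySem.Str.lower model1
  let model2_lower := PySem.Str.lower model2
  let compatible_groups : List (PySem.Set String) :=
    [PySem.Set.ofList ["subscription", "tiered", "freemium"],
     PySem.Set.ofList ["one-time", "lifetime"],
     PySem.Set.ofList ["per-seat", "per-user"]]
  -- the for-loop with early 'return True' and final 'return False'
  compatible_groups.any (fun group =>
    PySem.Set.contains group model1_lower && PySem.Set.contains group model2_lower)

-- ===== PORT B =====
def pvGroups : List (List String) :=
  [["subscription", "tiered", "freemium"],
   ["one-time", "lifetime"],
   ["per-seat", "per-user"]]

-- the comprehension '(a, b) for g in _GROUPS for a in g for b in g' fed to frozenset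
def pvCompatiblePairs : PySem.Set (String × String) :=
  PySem.Set.ofList (pvGroups.flatMap (fun g => g.flatMap (fun a => g.map (fun b => (a, b)))))

def are_payment_models_compatible_py_alt (model1 : String) (model2 : String) : Bool :=
  PySem.Set.contains pvCompatiblePairs (PySem.Str.lower model1, PySem.Str.lower model2)

-- ===== PRECONDITION & SPEC =====
def Spec_are_payment_models_compatible_py (model1 : String) (model2 : String) (out : Bool) : Prop := out = are_payment_models_compatible_py_alt model1 model2
instance (model1 : String) (model2 : String) (out : Bool) : Decidable (Spec_are_payment_models_compatible_py model1 model2 out) := by unfold Spec_are_payment_models_compatible_py; infer_instance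

-- ===== CLAIM (what is proved, stated in full; the proofs are below) =====
def Claim_equal_are_payment_models_compatible_py : Prop := ∀ (model1 : String) (model2 : String), Dom_are_payment_models_compatible_py model1 model2 → Spec_are_payment_models_compatible_py model1 model2 (are_payment_models_compatible_py model1 model2)

-- ===== LEMMAS AND PROOFS =====

-- the seven model names occurring in either program
def pvNames : List String :=
  ["subscription", "tiered", "freemium", "one-time", "lifetime", "per-seat", "per-user"]

-- if the first lowered model is none of the seven names, both programs answer false
theorem pv_absent1 (l1 l2 : String) (h : l1 ∉ pvNames) :
    ([PySem.Set.ofList ["subscription", "tiered", "freemium"],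
      PySem.Set.ofList ["one-time", "lifetime"],
      PySem.Set.ofList ["per-seat", "per-user"]].any (fun group =>
        PySem.Set.contains group l1 && PySem.Set.contains group l2))
    = PySem.Set.contains pvCompatiblePairs (l1, l2) := by
  simp only [pvNames, List.mem_cons, List.not_mem_nil, or_false, not_or] at h
  obtain ⟨h1, h2, h3, h4, h5, h6, h7⟩ := h
  simp only [PySem.Set.contains_eq_listContains]
  simp [pvCompatiblePairs, pvGroups, PySem.Set.ofList, PySem.Set.add, PySem.Set.contains,
        List.contains_eq_mem, Prod.mk.injEq, h1, h2, h3, h4, h5, h6, h7]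

-- same for the second lowered model
theorem pv_absent2 (l1 l2 : String) (h : l2 ∉ pvNames) :
    ([PySem.Set.ofList ["subscription", "tiered", "freemium"],
      PySem.Set.ofList ["one-time", "lifetime"],
      PySem.Set.ofList ["per-seat", "per-user"]].any (fun group =>
        PySem.Set.contains group l1 && PySem.Set.contains group l2))
    = PySem.Set.contains pvCompatiblePairs (l1, l2) := by
  simp only [pvNames, List.mem_cons, List.not_mem_nil, or_false, not_or] at h
  obtain ⟨h1, h2, h3, h4, h5, h6, h7⟩ := h
  simp only [PySem.Set.contains_eq_listContains]
  simp [pvCompatiblePairs, pvGroups, PySem.Set.ofList, PySem.Set.add, PySem.Set.contains,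
        List.contains_eq_mem, Prod.mk.injEq, h1, h2, h3, h4, h5, h6, h7]

-- ===== VERDICT (by name: the statement is the Claim_ definition above) =====
theorem are_payment_models_compatible_py_spec : Claim_equal_are_payment_models_compatible_py := by
  intro model1 model2 _
  unfold Spec_are_payment_models_compatible_py
  unfold are_payment_models_compatible_py are_payment_models_compatible_py_alt
  generalize PySem.Str.lower model1 = l1
  generalize PySem.Str.lower model2 = l2
  by_cases hm1 : l1 ∈ pvNames
  · by_cases hm2 : l2 ∈ pvNames
    · fin_cases hm1 <;> fin_cases hm2 <;> decide
    · exact pv_absent2 l1 l2 hm2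
  · exact pv_absent1 l1 l2 hm1
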